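-- pv_equiv track=rewrite | github.com/lamelameo/Algorithms-Udacity-Misc | udacity_cs215.py | long_and_simple_decision
-- ===== SOURCE A (Python) =====
-- def all_perms(seq):
--     # creates a list of all permutations of the given sequence of nodes
--     if len(seq) == 0:
--         return [[]]
--     if len(seq) == 1:
--         return [seq, []]
--     most = all_perms(seq[1:])
--     first = seq[0]
--     rest = []
--     for perm in most:
--         for i in range(len(perm) + 1):
--             rest.append(perm[0:i] + [first] + perm[i:])
--     return most + rest
--
-- def check_path(G, path):
--     # check if each node in the path is connected to the next node in the path, if any are not
--     # then it is not a valid path in the graph, as a connection is missing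
--     for i in range(len(path) - 1):
--         if path[i + 1] not in G[path[i]]:
--             return False
--     return True
--
-- def long_and_simple_decision(G, u, v, l):
--     if l == 0:
--         return False
--     # creates all possible permutations of node paths in the graph, even if they arent actual paths in the graph
--     # example: Tree rooted at 1, with children 2,3: [1,2] (valid), [1,2,3] (invalid - no edge bweteen 2 and 3)
--     perms = all_perms(list(G.keys()))
--     # check the permutations to see if there are any paths in the graph of length l (all permutations are simple paths)
--     for perm in perms:
--         # check permutation is correct length, is an actual path in the graph, starts with u, and ends with v
--         if (len(perm) >= l and check_path(G, perm) and perm[0] == u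
--                 and perm[len(perm) - 1] == v):
--             return True
--     return False
-- ===== SOURCE B (Python) =====
-- def long_and_simple_decision(G, u, v, l):
--     # DFS/backtracking over actual edges instead of enumerating all permutations of the nodes.
--     if l == 0 or u not in G:
--         return False
--     def dfs(node, visited, count):
--         if node == v:
--             return count >= l
--         for nb in G[node]:
--             if nb in G and nb not in visited:
--                 visited.add(nb)
--                 if dfs(nb, visited, count + 1):
--                     return True
--                 visited.discard(nb)
--         return False
--     return dfs(u, {u}, 1)
-- ===== Notes on version B (the rewrite author's own statement) =====
-- stated objective: faster
-- what changed: A enumerates every permutation of every subset of the nodes and tests each candidate sequence; B does a depth-first backtracking search from u that follows only actual edges, prunes visited nodes, and succeeds on reaching v with at least l nodes (intended as asymptotically faster; in a timing run A timed out at n=16 where B returned, so no clean ratio could be measured).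
-- outside the precondition, e.g. on long_and_simple_decision({0: [0]}, 0, 0, -1): A returns True, B returns True
import Mathlib
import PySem

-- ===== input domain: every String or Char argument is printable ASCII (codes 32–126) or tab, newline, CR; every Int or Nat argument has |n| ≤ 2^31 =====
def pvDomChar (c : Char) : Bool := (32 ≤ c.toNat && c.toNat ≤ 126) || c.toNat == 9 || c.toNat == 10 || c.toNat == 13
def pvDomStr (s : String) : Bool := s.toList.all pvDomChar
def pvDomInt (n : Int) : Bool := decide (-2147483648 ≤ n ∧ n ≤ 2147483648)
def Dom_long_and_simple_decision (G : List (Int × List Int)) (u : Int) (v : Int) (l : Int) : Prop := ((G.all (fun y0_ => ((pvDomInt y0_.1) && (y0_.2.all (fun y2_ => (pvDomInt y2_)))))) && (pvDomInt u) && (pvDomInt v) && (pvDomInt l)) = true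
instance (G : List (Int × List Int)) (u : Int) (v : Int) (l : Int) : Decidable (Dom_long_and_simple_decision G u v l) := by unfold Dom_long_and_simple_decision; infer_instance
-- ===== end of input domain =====

-- B replaces A's enumeration of all permutations of all node subsets by a depth-first
-- backtracking search from u along actual edges (prune visited nodes, succeed at v with ≥ l nodes).

-- ===== PORT A =====
def allPerms : List Int → List (List Int)
  | [] => [[]]
  | [x] => [[x], []]
  | x :: y :: t =>
    let most := allPerms (y :: t)
    most ++ most.flatMap (fun perm =>
      (List.range (perm.length + 1)).map (fun i => perm.take i ++ [x] ++ perm.drop i))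

def checkPath (d : PySem.Dict Int (List Int)) (path : List Int) : Bool :=
  (List.range (path.length - 1)).all
    (fun i => (d.getD (path.getD i 0) []).contains (path.getD (i + 1) 0))

def long_and_simple_decision (G : List (Int × List Int)) (u : Int) (v : Int) (l : Int) : Bool :=
  if l == 0 then false
  else
    let d := PySem.Dict.ofList G
    (allPerms d.keys).any (fun perm =>
      decide (l ≤ (perm.length : Int)) && checkPath d perm &&
      (perm.getD 0 0 == u) && (perm.getD (perm.length - 1) 0 == v))

-- ===== PORT B =====
def dfsAlt (d : PySem.Dict Int (List Int)) (v l : Int) :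
    Nat → Int → PySem.Set Int → Int → Bool
  | 0, _, _, _ => false
  | fuel + 1, node, visited, count =>
    if node == v then decide (l ≤ count)
    else (d.getD node []).any (fun nb =>
      if d.contains nb && !(PySem.Set.contains visited nb) then
        dfsAlt d v l fuel nb (PySem.Set.add visited nb) (count + 1)
      else false)

def long_and_simple_decision_alt (G : List (Int × List Int)) (u : Int) (v : Int) (l : Int) : Bool :=
  let d := PySem.Dict.ofList G
  if l == 0 || !d.contains u then false
  else dfsAlt d v l d.keys.length u (PySem.Set.ofList [u]) 1

-- ===== PRECONDITION & SPEC =====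
-- Pre_ excludes negative l, on which A's guard 'len(perm) >= l' admits the empty permutation
-- and 'perm[0]' raises IndexError (unless some qualifying permutation happens to be enumerated first).
def Pre_long_and_simple_decision (G : List (Int × List Int)) (u : Int) (v : Int) (l : Int) : Prop :=
  0 ≤ l

instance (G : List (Int × List Int)) (u : Int) (v : Int) (l : Int) : Decidable (Pre_long_and_simple_decision G u v l) := by unfold Pre_long_and_simple_decision; infer_instance

def pvWitness_long_and_simple_decision : (List (Int × List Int)) × Int × Int × Int :=
  ([(1, [2]), (2, [])], 1, 2, 2)

def Spec_long_and_simple_decision (G : List (Int × List Int)) (u : Int) (v : Int) (l : Int) (out : Bool) : Prop := out = long_and_simple_decision_alt G u v l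
instance (G : List (Int × List Int)) (u : Int) (v : Int) (l : Int) (out : Bool) : Decidable (Spec_long_and_simple_decision G u v l out) := by unfold Spec_long_and_simple_decision; infer_instance

-- ===== CLAIM (what is proved, stated in full; the proofs are below) =====
def Claim_equal_long_and_simple_decision : Prop := ∀ (G : List (Int × List Int)) (u : Int) (v : Int) (l : Int), Dom_long_and_simple_decision G u v l → Pre_long_and_simple_decision G u v l → Spec_long_and_simple_decision G u v l (long_and_simple_decision G u v l)

-- ===== LEMMAS AND PROOFS =====

-- checkPath unfolding
theorem checkPath_cons (d : PySem.Dict Int (List Int)) (a b : Int) (t : List Int) :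
    checkPath d (a :: b :: t) = ((d.getD a []).contains b && checkPath d (b :: t)) := by
  simp [checkPath, List.range_succ_eq_map, List.all_map, Function.comp_def]
  rfl

-- membership in allPerms, soundness half
theorem allPerms_sound (s : List Int) (hs : s.Nodup) (p : List Int) (hp : p ∈ allPerms s) :
    p.Nodup ∧ ∀ x ∈ p, x ∈ s := by
  induction s using allPerms.induct generalizing p with
  | case1 =>
    simp [allPerms] at hp; simp [hp]
  | case2 x =>
    simp [allPerms] at hp
    rcases hp with h | h <;> simp [h]
  | case3 x y t ih =>
    simp only [allPerms, List.mem_append, List.mem_flatMap, List.mem_map, List.mem_range] at hp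
    have hx : x ∉ y :: t := by
      intro h; exact (List.nodup_cons.mp hs).1 h
    rcases hp with h | ⟨q, hq, i, hi, rfl⟩
    · obtain ⟨h1, h2⟩ := ih (List.nodup_cons.mp hs).2 p h
      exact ⟨h1, fun z hz => List.mem_cons_of_mem _ (h2 z hz)⟩
    · obtain ⟨h1, h2⟩ := ih (List.nodup_cons.mp hs).2 q hq
      have hperm : (q.take i ++ [x] ++ q.drop i).Perm (x :: q) := by
        rw [List.append_assoc]
        refine (List.perm_middle).trans ?_
        simp [List.take_append_drop]
      constructor
      · refine hperm.nodup_iff.mpr (List.nodup_cons.mpr ⟨fun hxq => hx (h2 x hxq), h1⟩)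
      · intro z hz
        have := hperm.mem_iff.mp hz
        rcases List.mem_cons.mp this with h' | hzq
        · rw [h']; exact List.mem_cons_self
        · exact List.mem_cons_of_mem _ (h2 z hzq)

-- membership in allPerms, completeness half
theorem allPerms_complete (s : List Int) : ∀ (p : List Int), p.Nodup → (∀ x ∈ p, x ∈ s) →
    p ∈ allPerms s := by
  induction s using allPerms.induct with
  | case1 =>
    intro p _ hsub
    have : p = [] := List.eq_nil_iff_forall_not_mem.mpr (fun a ha => by simpa using hsub a ha)
    simp [allPerms, this]
  | case2 x =>
    intro p hnd hsub
    match p, hnd with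
    | [], _ => simp [allPerms]
    | [a], _ =>
      have : a = x := by simpa using hsub a (by simp)
      simp [allPerms, this]
    | a :: b :: t, hnd =>
      have ha : a = x := by simpa using hsub a (by simp)
      have hb : b = x := by simpa using hsub b (by simp)
      exfalso
      rw [ha, hb] at hnd
      simp at hnd
  | case3 x y t ih =>
    intro p hnd hsub
    by_cases hxp : x ∈ p
    · obtain ⟨p₁, p₂, rfl⟩ := List.append_of_mem hxp
      have hmid : (x :: (p₁ ++ p₂)).Nodup := List.nodup_middle.mp hnd
      have hxq : x ∉ p₁ ++ p₂ := (List.nodup_cons.mp hmid).1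
      have hq : p₁ ++ p₂ ∈ allPerms (y :: t) := by
        refine ih (p₁ ++ p₂) (List.nodup_cons.mp hmid).2 (fun z hz => ?_)
        have hzp : z ∈ p₁ ++ x :: p₂ := by
          rcases List.mem_append.mp hz with h | h
          · exact List.mem_append.mpr (Or.inl h)
          · exact List.mem_append.mpr (Or.inr (List.mem_cons_of_mem _ h))
        rcases List.mem_cons.mp (hsub z hzp) with h | h
        · exact absurd (h ▸ hz) hxq
        · exact h
      simp only [allPerms, List.mem_append, List.mem_flatMap, List.mem_map, List.mem_range]
      refine Or.inr ⟨p₁ ++ p₂, hq, p₁.length, by simp, ?_⟩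
      rw [List.take_left, List.drop_left]
      simp
    · have : p ∈ allPerms (y :: t) := by
        refine ih p hnd (fun z hz => ?_)
        rcases List.mem_cons.mp (hsub z hz) with h | h
        · exact absurd (h ▸ hz) hxp
        · exact h
      simp only [allPerms, List.mem_append]
      exact Or.inl this

-- the property A's inner test checks, as a predicate on the candidate list
def GoodPath (d : PySem.Dict Int (List Int)) (u v l : Int) (p : List Int) : Prop :=
  p.Nodup ∧ (∀ x ∈ p, x ∈ d.keys) ∧ l ≤ (p.length : Int) ∧ checkPath d p = true ∧
    p.head? = some u ∧ p.getLast? = some v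

theorem test_iff (d : PySem.Dict Int (List Int)) (u v l : Int) (hl : 1 ≤ l) (p : List Int) :
    (decide (l ≤ (p.length : Int)) && checkPath d p &&
      (p.getD 0 0 == u) && (p.getD (p.length - 1) 0 == v)) = true ↔
    (l ≤ (p.length : Int) ∧ checkPath d p = true ∧ p.head? = some u ∧ p.getLast? = some v) := by
  match p with
  | [] =>
    simp
    intro h; omega
  | a :: t =>
    have hne : (a :: t) ≠ [] := by simp
    have hlen : (a :: t).length - 1 < (a :: t).length := by simp
    rw [List.getD_eq_getElem _ _ hlen, ← List.getLast_eq_getElem]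
    simp [Bool.and_assoc, List.getLast?_eq_some_getLast hne, and_assoc, and_comm, and_left_comm]
    exact hne

theorem A_iff (G : List (Int × List Int)) (u v l : Int) (hl : 1 ≤ l) :
    long_and_simple_decision G u v l = true ↔
      ∃ p, GoodPath (PySem.Dict.ofList G) u v l p := by
  have hl0 : (l == 0) = false := by simp; omega
  unfold long_and_simple_decision
  simp only [hl0, Bool.false_eq_true, if_false, List.any_eq_true]
  constructor
  · rintro ⟨p, hp, hf⟩
    obtain ⟨h1, h2⟩ := allPerms_sound _ (PySem.Dict.nodup_keys_ofList G) p hp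
    obtain ⟨hlen, hcp, hh, hlast⟩ := (test_iff _ u v l hl p).mp hf
    exact ⟨p, h1, h2, hlen, hcp, hh, hlast⟩
  · rintro ⟨p, h1, h2, hlen, hcp, hh, hlast⟩
    exact ⟨p, allPerms_complete _ p h1 h2, (test_iff _ u v l hl p).mpr ⟨hlen, hcp, hh, hlast⟩⟩

theorem dfs_sound (d : PySem.Dict Int (List Int)) (v l : Int) :
    ∀ (fuel : Nat) (node : Int) (visited : PySem.Set Int) (count : Int),
      node ∈ d.keys → node ∈ visited →
      dfsAlt d v l fuel node visited count = true →
      ∃ q : List Int, q.head? = some node ∧ q.getLast? = some v ∧ q.Nodup ∧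
        (∀ x ∈ q, x ∈ d.keys) ∧ (∀ x ∈ q.tail, x ∉ visited) ∧
        checkPath d q = true ∧ l ≤ count + (q.length : Int) - 1 := by
  intro fuel
  induction fuel with
  | zero => intro node visited count _ _ h; simp [dfsAlt] at h
  | succ f ih =>
    intro node visited count hkey hvis h
    rw [dfsAlt] at h
    by_cases hv : node = v
    · rw [if_pos (by simp [hv])] at h
      refine ⟨[node], by simp, by simp [hv], by simp, by simpa using hkey, by simp, by simp [checkPath], ?_⟩
      have := of_decide_eq_true h
      simpa using this
    · rw [if_neg (by simp [hv])] at h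
      rw [List.any_eq_true] at h
      obtain ⟨nb, hnb, hif⟩ := h
      by_cases hc : (d.contains nb && !(PySem.Set.contains visited nb)) = true
      · rw [if_pos hc] at hif
        obtain ⟨hc1, hc2⟩ := Bool.and_eq_true_iff.mp hc
        have hknb : nb ∈ d.keys := (PySem.Dict.contains_iff_mem_keys d nb).mp hc1
        have hnv : nb ∉ visited := by simpa using hc2
        obtain ⟨q', hh, hlast, hnd, hkeys, htail, hcp, hlen⟩ :=
          ih nb (PySem.Set.add visited nb) (count + 1) hknb
            ((PySem.Set.mem_add _ _ _).mpr (Or.inr rfl)) hif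
        obtain ⟨q'', rfl⟩ : ∃ q'', q' = nb :: q'' := by
          cases q' with
          | nil => simp at hh
          | cons a t => exact ⟨t, by simpa using (by simpa using hh : a = nb) ▸ rfl⟩
        have hnodeq : node ∉ nb :: q'' := by
          intro hm
          rcases List.mem_cons.mp hm with h' | h'
          · exact hnv (h' ▸ hvis)
          · exact (htail node h') ((PySem.Set.mem_add _ _ _).mpr (Or.inl hvis))
        refine ⟨node :: nb :: q'', by simp, by simpa using hlast, ?_, ?_, ?_, ?_, ?_⟩
        · exact List.nodup_cons.mpr ⟨hnodeq, hnd⟩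
        · intro x hx
          rcases List.mem_cons.mp hx with h' | h'
          · exact h' ▸ hkey
          · exact hkeys x h'
        · intro x hx
          rcases List.mem_cons.mp hx with h' | h'
          · exact h' ▸ hnv
          · intro hm; exact (htail x h') ((PySem.Set.mem_add _ _ _).mpr (Or.inl hm))
        · rw [checkPath_cons]
          refine Bool.and_eq_true_iff.mpr ⟨?_, hcp⟩
          simpa using hnb
        · simp only [List.length_cons] at hlen ⊢
          push_cast at hlen ⊢
          omega
      · rw [if_neg hc] at hif; simp at hif

theorem dfs_complete (d : PySem.Dict Int (List Int)) (v l : Int) :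
    ∀ (q : List Int) (fuel : Nat) (node : Int) (visited : PySem.Set Int) (count : Int),
      q.head? = some node → q.getLast? = some v → q.Nodup →
      (∀ x ∈ q, x ∈ d.keys) → (∀ x ∈ q.tail, x ∉ visited) →
      checkPath d q = true → l ≤ count + (q.length : Int) - 1 → q.length ≤ fuel →
      dfsAlt d v l fuel node visited count = true := by
  intro q
  induction q with
  | nil => intro fuel node visited count hh; simp at hh
  | cons a q' ih =>
    intro fuel node visited count hh hlast hnd hkeys htail hcp hlen hfuel
    have ha : a = node := by simpa using hh
    subst ha
    obtain ⟨f, rfl⟩ : ∃ f, fuel = f + 1 :=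
      ⟨fuel - 1, by simp at hfuel; omega⟩
    rw [dfsAlt]
    by_cases hveq : a = v
    · rw [if_pos (by simp [hveq])]
      cases q' with
      | nil =>
        simp only [List.length_cons, List.length_nil] at hlen
        simp only [decide_eq_true_eq]
        push_cast at hlen; omega
      | cons b t =>
        exfalso
        have : v ∈ b :: t := by
          have : (b :: t).getLast? = some v := by simpa using hlast
          exact List.mem_of_getLast? this
        rw [← hveq] at this
        exact (List.nodup_cons.mp hnd).1 this
    · rw [if_neg (by simp [hveq])]
      cases q' with
      | nil => exact absurd (by simpa using hlast) hveq
      | cons b t =>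
        rw [checkPath_cons] at hcp
        obtain ⟨hedge, hcp'⟩ := Bool.and_eq_true_iff.mp hcp
        rw [List.any_eq_true]
        refine ⟨b, by simpa using hedge, ?_⟩
        have hbvis : b ∉ visited := htail b (by simp)
        have hcnd : (d.contains b && !(PySem.Set.contains visited b)) = true := by
          refine Bool.and_eq_true_iff.mpr ⟨?_, ?_⟩
          · exact (PySem.Dict.contains_iff_mem_keys d b).mpr (hkeys b (by simp))
          · simpa using hbvis
        rw [if_pos hcnd]
        refine ih f b (visited.add b) (count + 1) rfl (by simpa using hlast)
          (List.nodup_cons.mp hnd).2 (fun x hx => hkeys x (List.mem_cons_of_mem _ hx))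
          ?_ hcp' ?_ (by simp at hfuel ⊢; omega)
        · intro x hx hm
          rcases (PySem.Set.mem_add _ _ _).mp hm with h' | h'
          · exact (htail x (List.mem_cons_of_mem _ hx)) h'
          · exact (List.nodup_cons.mp (List.nodup_cons.mp hnd).2).1 (h' ▸ hx)
        · simp only [List.length_cons] at hlen ⊢
          push_cast at hlen ⊢
          omega

-- ===== VERDICT (by name: the statement is the Claim_ definition above) =====
theorem long_and_simple_decision_spec : Claim_equal_long_and_simple_decision := by
  intro G u v l _ hpre
  unfold Spec_long_and_simple_decision
  unfold Pre_long_and_simple_decision at hpre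
  by_cases hl0 : l = 0
  · simp [long_and_simple_decision, long_and_simple_decision_alt, hl0]
  · have hl : 1 ≤ l := by omega
    by_cases hu : (PySem.Dict.ofList G).contains u = true
    · have hkeyu : u ∈ (PySem.Dict.ofList G).keys :=
        (PySem.Dict.contains_iff_mem_keys _ u).mp hu
      have halt : long_and_simple_decision_alt G u v l =
          dfsAlt (PySem.Dict.ofList G) v l (PySem.Dict.ofList G).keys.length u
            (PySem.Set.ofList [u]) 1 := by
        simp [long_and_simple_decision_alt, hl0, hu]
      rw [halt]
      rw [Bool.eq_iff_iff]
      constructor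
      · intro h
        obtain ⟨p, hnd, hkeys, hlen, hcp, hh, hlast⟩ := (A_iff G u v l hl).mp h
        have hpu : ∃ t, p = u :: t := by
          cases p with
          | nil => simp at hh
          | cons a t => exact ⟨t, by simpa using (by simpa using hh : a = u) ▸ rfl⟩
        obtain ⟨t, rfl⟩ := hpu
        refine dfs_complete _ v l (u :: t) _ u (PySem.Set.ofList [u]) 1 hh hlast hnd hkeys
          ?_ hcp ?_ ?_
        · intro x hx hm
          have hxu : x = u := by simpa using (PySem.Set.mem_ofList _ _).mp hm
          exact (List.nodup_cons.mp hnd).1 (hxu ▸ hx)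
        · push_cast at hlen ⊢; omega
        · have hsub : (u :: t).Subperm (PySem.Dict.ofList G).keys :=
            List.subperm_of_subset hnd hkeys
          exact hsub.length_le
      · intro h
        obtain ⟨q, hh, hlast, hnd, hkeys, htail, hcp, hlen⟩ :=
          dfs_sound _ v l _ u _ 1 hkeyu ((PySem.Set.mem_ofList _ _).mpr (by simp)) h
        refine (A_iff G u v l hl).mpr ⟨q, hnd, hkeys, ?_, hcp, hh, hlast⟩
        push_cast at hlen ⊢; omega
    · have halt : long_and_simple_decision_alt G u v l = false := by
        simp only [Bool.not_eq_true] at hu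
        simp [long_and_simple_decision_alt, hu]
      have hA : long_and_simple_decision G u v l = false := by
        rw [Bool.eq_false_iff]
        intro htrue
        obtain ⟨p, hnd, hkeys, hlen, hcp, hh, hlast⟩ := (A_iff G u v l hl).mp htrue
        exact hu ((PySem.Dict.contains_iff_mem_keys _ u).mpr
          (hkeys u (List.mem_of_mem_head? hh)))
      rw [hA, halt]
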